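-- pv_equiv track=rewrite | github.com/luyu-wu/ESC180 | ExamReview/2024p2.py | most_tasks
-- ===== SOURCE A (Python) =====
-- def num_tasks(tasks, elf_name):
--     count = 0
--     for i in tasks:
--         if tasks[i] == elf_name:
--             count += 1
--     return count
--
-- def most_tasks(tasks):
--     most = 0
--     most_name = ""
--     for i in tasks:
--         if num_tasks(tasks,tasks[i]) > most:
--             most = num_tasks(tasks,tasks[i])
--             most_name = tasks[i]
--     return most_name
-- ===== SOURCE B (Python) =====
-- def most_tasks(tasks):
--     # One pass builds a count per elf; a second pass over the distinct elves
--     # (insertion = first-occurrence order) picks the first strictly-maximal one.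
--     counts = {}
--     for elf in tasks.values():
--         counts[elf] = counts.get(elf, 0) + 1
--     best = 0
--     best_name = ""
--     for elf, c in counts.items():
--         if c > best:
--             best = c
--             best_name = elf
--     return best_name
-- ===== Notes on version B (the rewrite author's own statement) =====
-- stated objective: faster
-- what changed: A rescans the whole dict (num_tasks) for every task, twice per hit; B builds a frequency dict in one pass over the values and then scans the distinct elves once, keeping A's first-occurrence tie-break.
import Mathlib
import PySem

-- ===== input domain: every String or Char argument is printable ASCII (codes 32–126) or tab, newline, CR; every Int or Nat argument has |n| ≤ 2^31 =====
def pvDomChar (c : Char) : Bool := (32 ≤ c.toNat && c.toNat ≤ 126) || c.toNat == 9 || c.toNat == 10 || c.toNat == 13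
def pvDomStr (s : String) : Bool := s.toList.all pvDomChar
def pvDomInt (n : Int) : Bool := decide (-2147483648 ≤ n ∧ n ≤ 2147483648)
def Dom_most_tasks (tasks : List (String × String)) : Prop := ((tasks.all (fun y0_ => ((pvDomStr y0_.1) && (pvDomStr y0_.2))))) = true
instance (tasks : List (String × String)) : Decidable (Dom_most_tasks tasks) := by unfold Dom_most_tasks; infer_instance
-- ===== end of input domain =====

-- B replaces A's per-task rescans (num_tasks) by one counting pass over the values
-- plus one scan over the distinct elves; measured faster (asymptotic: O(n^2) → O(n)).

-- ===== PORT A =====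
-- 'tasks[i]' with i a key of the dict cannot raise; getD with dummy default "" is exact there.
def num_tasks (tasks : List (String × String)) (elf_name : String) : Int :=
  (PySem.Dict.mk tasks).keys.foldl
    (fun count i =>
      if (PySem.Dict.mk tasks).getD i "" == elf_name then count + 1 else count)
    0

def most_tasks (tasks : List (String × String)) : String :=
  ((PySem.Dict.mk tasks).keys.foldl
    (fun s i =>
      if num_tasks tasks ((PySem.Dict.mk tasks).getD i "") > s.1 then
        (num_tasks tasks ((PySem.Dict.mk tasks).getD i ""), (PySem.Dict.mk tasks).getD i "")
      else s)
    ((0 : Int), "")).2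

-- ===== PORT B =====
def most_tasks_alt (tasks : List (String × String)) : String :=
  let counts :=
    (PySem.Dict.mk tasks).values.foldl
      (fun d x => d.insert x (d.getD x 0 + 1)) (PySem.Dict.empty : PySem.Dict String Int)
  (counts.items.foldl
    (fun s p => if p.2 > s.1 then (p.2, p.1) else s)
    ((0 : Int), "")).2

-- ===== PRECONDITION & SPEC =====
-- The list encodes a Python dict, which cannot hold two entries with the same key:
-- Pre_ requires pairwise-distinct keys; it excludes no input the Python function can receive.
def Pre_most_tasks (tasks : List (String × String)) : Prop :=
  (tasks.map Prod.fst).Nodup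
instance (tasks : List (String × String)) : Decidable (Pre_most_tasks tasks) := by
  unfold Pre_most_tasks; infer_instance

def pvWitness_most_tasks : (List (String × String)) :=
  [("wrap", "alice"), ("gifts", "bob"), ("sled", "alice")]

def Spec_most_tasks (tasks : List (String × String)) (out : String) : Prop := out = most_tasks_alt tasks
instance (tasks : List (String × String)) (out : String) : Decidable (Spec_most_tasks tasks out) := by unfold Spec_most_tasks; infer_instance

-- ===== CLAIM (what is proved, stated in full; the proofs are below) =====
def Claim_equal_most_tasks : Prop := ∀ (tasks : List (String × String)), Dom_most_tasks tasks → Pre_most_tasks tasks → Spec_most_tasks tasks (most_tasks tasks)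

-- ===== LEMMAS AND PROOFS =====

-- The common shape of both final scans: keep the first value whose count is strictly larger.
def pvStep (c : String → Int) (s : Int × String) (v : String) : Int × String :=
  if c v > s.1 then (c v, v) else s

theorem pvStep_fst_le (c : String → Int) (s : Int × String) (v : String) :
    s.1 ≤ (pvStep c s v).1 := by
  unfold pvStep; split_ifs with h
  · exact le_of_lt h
  · exact le_refl _

theorem pvStep_fst_ge (c : String → Int) (s : Int × String) (v : String) :
    c v ≤ (pvStep c s v).1 := by
  unfold pvStep; split_ifs with h
  · exact le_refl _
  · omega

theorem pvStep_absorb (c : String → Int) (s : Int × String) (v : String)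
    (h : c v ≤ s.1) : pvStep c s v = s := by
  unfold pvStep; split_ifs with h' <;> [omega; rfl]

-- Once the running maximum dominates c a, every later a is a no-op.
theorem pvFoldl_filter (c : String → Int) (a : String) :
    ∀ (l : List String) (s : Int × String), c a ≤ s.1 →
      l.foldl (pvStep c) s = (l.filter (fun w => w != a)).foldl (pvStep c) s := by
  intro l
  induction l with
  | nil => intro s _; rfl
  | cons w l ih =>
    intro s hs
    by_cases hw : w = a
    · subst hw
      simp only [List.foldl_cons, List.filter_cons, bne_self_eq_false, Bool.false_eq_true,
        if_false, pvStep_absorb c s w hs]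
      exact ih s hs
    · have hb : (w != a) = true := by simp [hw]
      simp only [List.foldl_cons, List.filter_cons, hb, if_true]
      exact ih (pvStep c s w) (le_trans hs (pvStep_fst_le c s w))

-- Same absorption for Set.add: an already-present element changes nothing.
theorem pvAdd_filter (a : String) :
    ∀ (l : List String) (s : PySem.Set String), a ∈ s →
      l.foldl PySem.Set.add s = (l.filter (fun w => w != a)).foldl PySem.Set.add s := by
  intro l
  induction l with
  | nil => intro s _; rfl
  | cons w l ih =>
    intro s hs
    by_cases hw : w = a
    · subst hw
      simp only [List.foldl_cons, List.filter_cons, bne_self_eq_false, Bool.false_eq_true,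
        if_false, PySem.Set.add_of_mem hs]
      exact ih s hs
    · have hb : (w != a) = true := by simp [hw]
      simp only [List.foldl_cons, List.filter_cons, hb, if_true]
      exact ih (PySem.Set.add s w) ((PySem.Set.mem_add s w a).mpr (Or.inl hs))

theorem pvAdd_cons (a : String) :
    ∀ (l : List String) (s : PySem.Set String), (∀ w ∈ l, w ≠ a) →
      l.foldl PySem.Set.add (a :: s) = a :: l.foldl PySem.Set.add s := by
  intro l
  induction l with
  | nil => intro s _; rfl
  | cons w l ih =>
    intro s hl
    have hw : w ≠ a := hl w (List.mem_cons_self)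
    have hstep : PySem.Set.add (a :: s) w = a :: PySem.Set.add s w := by
      by_cases hm : w ∈ s
      · rw [PySem.Set.add_of_mem (List.mem_cons_of_mem a hm), PySem.Set.add_of_mem hm]
      · rw [PySem.Set.add_of_not_mem (by simp [hw, hm]), PySem.Set.add_of_not_mem hm]
        rfl
    simp only [List.foldl_cons, hstep]
    exact ih (PySem.Set.add s w) (fun v hv => hl v (List.mem_cons_of_mem w hv))

theorem pvOfList_cons (a : String) (l : List String) :
    PySem.Set.ofList (a :: l) = a :: PySem.Set.ofList (l.filter (fun w => w != a)) := by
  rw [PySem.Set.ofList_eq_foldl, PySem.Set.ofList_eq_foldl]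
  have h1 : (a :: l).foldl PySem.Set.add [] = l.foldl PySem.Set.add [a] := rfl
  rw [h1, pvAdd_filter a l [a] (List.mem_singleton.mpr rfl)]
  exact pvAdd_cons a _ [] (by
    intro w hw
    have := (List.mem_filter.mp hw).2
    simpa using this)

-- Scanning all values equals scanning their first occurrences (the dedup set).
theorem pvMain (c : String → Int) :
    ∀ (n : Nat) (l : List String) (s : Int × String), l.length ≤ n →
      l.foldl (pvStep c) s = (PySem.Set.ofList l).foldl (pvStep c) s := by
  intro n
  induction n with
  | zero =>
    intro l s hl
    have : l = [] := List.eq_nil_of_length_eq_zero (Nat.le_zero.mp hl)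
    subst this; rfl
  | succ n ih =>
    intro l s hl
    cases l with
    | nil => rfl
    | cons a l =>
      rw [pvOfList_cons]
      simp only [List.foldl_cons]
      rw [pvFoldl_filter c a l (pvStep c s a) (pvStep_fst_ge c s a)]
      exact ih _ _ (le_trans (List.length_filter_le _ l) (Nat.lt_succ_iff.mp hl))

-- A's inner helper counts elf_name among the dict's values.
theorem pvNumTasks (tasks : List (String × String)) (h : (tasks.map Prod.fst).Nodup)
    (elf : String) :
    num_tasks tasks elf = ((tasks.map Prod.snd).count elf : Int) := by
  unfold num_tasks
  rw [PySem.Dict.keys_mk, List.foldl_map]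
  rw [PySem.List.foldl_congr_mem tasks _
    (fun count p => if p.2 == elf then count + 1 else count) 0
    (by
      intro acc p hp
      have hd : (PySem.Dict.mk tasks).getD p.1 "" = p.2 :=
        PySem.Dict.getD_of_mem_items (PySem.Dict.mk tasks) (k := p.1) (v := p.2)
          (by exact hp) (by rw [PySem.Dict.keys_mk]; exact h) ""
      rw [hd])]
  rw [← List.foldl_map (f := Prod.snd) (g := fun count v => if v == elf then count + 1 else count)]
  rw [PySem.List.foldl_count_if (fun v => v == elf) (tasks.map Prod.snd) 0]
  rw [List.count_eq_countP]
  simp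

-- A's outer loop is the pvStep scan over the values list.
theorem pvA (tasks : List (String × String)) (h : (tasks.map Prod.fst).Nodup) :
    most_tasks tasks =
      ((tasks.map Prod.snd).foldl
        (pvStep (fun v => ((tasks.map Prod.snd).count v : Int))) ((0 : Int), "")).2 := by
  unfold most_tasks
  rw [PySem.Dict.keys_mk, List.foldl_map]
  rw [PySem.List.foldl_congr_mem tasks _
    (fun s p => pvStep (fun v => ((tasks.map Prod.snd).count v : Int)) s p.2) ((0 : Int), "")
    (by
      intro s p hp
      have hd : (PySem.Dict.mk tasks).getD p.1 "" = p.2 :=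
        PySem.Dict.getD_of_mem_items (PySem.Dict.mk tasks) (k := p.1) (v := p.2)
          (by exact hp) (by rw [PySem.Dict.keys_mk]; exact h) ""
      rw [hd, pvNumTasks tasks h p.2]
      rfl)]
  rw [← List.foldl_map (f := Prod.snd)
    (g := pvStep (fun v => ((tasks.map Prod.snd).count v : Int)))]

-- B's two passes are the same scan over the distinct values.
theorem pvB (tasks : List (String × String)) :
    most_tasks_alt tasks =
      ((PySem.Set.ofList (tasks.map Prod.snd)).foldl
        (pvStep (fun v => ((tasks.map Prod.snd).count v : Int))) ((0 : Int), "")).2 := by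
  unfold most_tasks_alt
  simp only [PySem.Dict.values_mk]
  rw [PySem.Dict.foldl_insert_getD_add_one_eq_counter (tasks.map Prod.snd)]
  rw [PySem.Dict.items_counter]
  rw [List.foldl_map]
  rfl

-- ===== VERDICT (by name: the statement is the Claim_ definition above) =====
theorem most_tasks_spec : Claim_equal_most_tasks := by
  intro tasks _ hpre
  unfold Spec_most_tasks
  rw [pvA tasks hpre, pvB tasks]
  rw [pvMain (fun v => ((tasks.map Prod.snd).count v : Int)) (tasks.map Prod.snd).length
    (tasks.map Prod.snd) ((0 : Int), "") (le_refl _)]
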